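-- pv_equiv track=rewrite | github.com/rhddnjs1974/Backjoon | 26~30RUBY/33748_2.py | build_vectors
-- ===== SOURCE A (Python) =====
-- def build_vectors(limit_i=78, limit_j=25):
--     # (dx,dy) = (min(i,j), max(i,j)), i in [0,limit_i-1], j in [1,limit_j-1]
--     # sort by hyp2 = i^2 + j^2, and keep only one per hyp2 (strictly increasing edge lengths)
--     seen_hyp2 = set()
--     vecs = []
--     for i in range(limit_i):
--         for j in range(1, limit_j):
--             dx = min(i, j)
--             dy = max(i, j)
--             if dx == 0 and dy == 0:
--                 continue
--             hyp2 = i*i + j*j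
--             if hyp2 in seen_hyp2:
--                 continue
--             seen_hyp2.add(hyp2)
--             vecs.append((hyp2, dx, dy))
--     vecs.sort()  # by hyp2
--     return [(dx,dy) for _,dx,dy in vecs]
-- ===== SOURCE B (Python) =====
-- def build_vectors(limit_i=78, limit_j=25):
--     # Same result, different decomposition: collect ALL triples (no membership set),
--     # stable-sort by hyp2, then keep the first element of each equal-hyp2 run.
--     trips = [(i * i + j * j, min(i, j), max(i, j))
--              for i in range(limit_i) for j in range(1, limit_j)]
--     trips.sort(key=lambda t: t[0])  # stable: first-seen triple leads its run
--     out = []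
--     prev = None
--     for h, dx, dy in trips:
--         if h != prev:
--             out.append((dx, dy))
--             prev = h
--     return out
-- ===== Notes on version B (the rewrite author's own statement) =====
-- stated objective: alternative
-- what changed: Replaces the seen-set membership dedup during generation by generating all triples, stable-sorting by hyp2, and keeping the first element of each equal-hyp2 run in one linear pass (first-seen tie-breaking comes from sort stability instead of a set).
import Mathlib
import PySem

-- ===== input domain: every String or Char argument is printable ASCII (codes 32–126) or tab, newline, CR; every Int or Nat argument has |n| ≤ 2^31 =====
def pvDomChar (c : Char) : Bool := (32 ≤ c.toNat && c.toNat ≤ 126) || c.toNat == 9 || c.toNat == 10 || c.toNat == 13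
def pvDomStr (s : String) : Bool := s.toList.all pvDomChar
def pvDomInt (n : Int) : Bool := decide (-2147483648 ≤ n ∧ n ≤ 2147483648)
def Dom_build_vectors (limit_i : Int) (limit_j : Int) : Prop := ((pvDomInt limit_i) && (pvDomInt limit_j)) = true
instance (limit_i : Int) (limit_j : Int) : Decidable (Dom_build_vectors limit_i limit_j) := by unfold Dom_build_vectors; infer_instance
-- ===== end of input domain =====

-- B replaces A's seen-set dedup during generation by generating all triples, stable-sorting
-- by hyp2 and keeping the first element of each equal-hyp2 run (alternative decomposition).

-- ===== PORT A =====
def build_vectors (limit_i : Int) (limit_j : Int) : List (Int × Int) :=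
  let st := (PySem.List.pyRange 0 limit_i 1).foldl (fun st i =>
      (PySem.List.pyRange 1 limit_j 1).foldl (fun (st : PySem.Set Int × List (Int × Int × Int)) j =>
        let dx := min i j
        let dy := max i j
        if dx = 0 ∧ dy = 0 then st
        else
          let hyp2 := i * i + j * j
          if hyp2 ∈ st.1 then st
          else (st.1.add hyp2, st.2 ++ [(hyp2, dx, dy)])) st)
    ((PySem.Set.ofList [], []) : PySem.Set Int × List (Int × Int × Int))
  -- vecs.sort() sorts the triples lexicographically; exact as a sort by the first
  -- component here because the hyp2 values in vecs are pairwise distinct (one per seen hyp2)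
  let vecs := PySem.List.sorted st.2 (fun t => t.1)
  vecs.map (fun t => (t.2.1, t.2.2))

-- ===== PORT B =====
def build_vectors_alt (limit_i : Int) (limit_j : Int) : List (Int × Int) :=
  let trips := (PySem.List.pyRange 0 limit_i 1).flatMap (fun i =>
      (PySem.List.pyRange 1 limit_j 1).map (fun j => (i * i + j * j, min i j, max i j)))
  let sortedTrips := PySem.List.sorted trips (fun t => t.1)
  let st := sortedTrips.foldl
      (fun (st : List (Int × Int) × Option Int) t =>
        if st.2 ≠ some t.1 then (st.1 ++ [(t.2.1, t.2.2)], some t.1) else st)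
      ([], none)
  st.1

-- ===== PRECONDITION & SPEC =====
def Spec_build_vectors (limit_i : Int) (limit_j : Int) (out : List (Int × Int)) : Prop := out = build_vectors_alt limit_i limit_j
instance (limit_i : Int) (limit_j : Int) (out : List (Int × Int)) : Decidable (Spec_build_vectors limit_i limit_j out) := by unfold Spec_build_vectors; infer_instance

-- ===== CLAIM (what is proved, stated in full; the proofs are below) =====
def Claim_equal_build_vectors : Prop := ∀ (limit_i : Int) (limit_j : Int), Dom_build_vectors limit_i limit_j → Spec_build_vectors limit_i limit_j (build_vectors limit_i limit_j)

-- ===== LEMMAS AND PROOFS =====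

-- the list of all generated triples, in generation order
def pvL (limit_i : Int) (limit_j : Int) : List (Int × Int × Int) :=
  (PySem.List.pyRange 0 limit_i 1).flatMap (fun i =>
    (PySem.List.pyRange 1 limit_j 1).map (fun j => (i * i + j * j, min i j, max i j)))

-- first-occurrence-per-key dedup (key = first component)
def pvFd : List (Int × Int × Int) → List (Int × Int × Int)
  | [] => []
  | t :: r => t :: pvFd (r.filter (fun u => decide (u.1 ≠ t.1)))
termination_by l => l.length
decreasing_by simp; exact le_trans (List.length_filter_le _ _) (by simp)

-- first-occurrence dedup with an explicit seen-key list (mirrors A's loop)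
def pvFdS : List Int → List (Int × Int × Int) → List (Int × Int × Int)
  | _, [] => []
  | seen, t :: r => if t.1 ∈ seen then pvFdS seen r else t :: pvFdS (t.1 :: seen) r

-- run-dedup recursion (mirrors B's final pass)
def pvRd : Option Int → List (Int × Int × Int) → List (Int × Int)
  | _, [] => []
  | p, t :: r => if p ≠ some t.1 then (t.2.1, t.2.2) :: pvRd (some t.1) r else pvRd p r

theorem pvFd_nil : pvFd [] = [] := by simp [pvFd]

theorem pvFd_cons (t : Int × Int × Int) (r : List (Int × Int × Int)) :
    pvFd (t :: r) = t :: pvFd (r.filter (fun u => decide (u.1 ≠ t.1))) := by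
  simp [pvFd]

-- strong induction tailored to pvFd's recursion
theorem pvFd_ind (motive : List (Int × Int × Int) → Prop) (h1 : motive [])
    (h2 : ∀ t r, motive (r.filter (fun u => decide (u.1 ≠ t.1))) → motive (t :: r)) :
    ∀ l, motive l := by
  intro l
  generalize hn : l.length = n
  induction n using Nat.strong_induction_on generalizing l with
  | _ n ih =>
    cases l with
    | nil => exact h1
    | cons t r =>
      refine h2 t r (ih _ ?_ _ rfl)
      subst hn
      exact Nat.lt_succ_of_le (List.length_filter_le _ _)

theorem pv_insertBy_nil {α : Type} (bef : α → α → Bool) (x : α) :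
    PySem.List.insertBy bef x [] = [x] := rfl

theorem pv_insertBy_cons {α : Type} (bef : α → α → Bool) (x y : α) (ys : List α) :
    PySem.List.insertBy bef x (y :: ys)
    = if bef x y then x :: y :: ys else y :: PySem.List.insertBy bef x ys := rfl

theorem pv_find?_eq_head?_filter {α : Type} (p : α → Bool) (l : List α) :
    l.find? p = (l.filter p).head? := by
  induction l with
  | nil => rfl
  | cons x r ih =>
    by_cases h : p x
    · rw [List.find?_cons_of_pos h, List.filter_cons_of_pos h, List.head?_cons]
    · rw [List.find?_cons_of_neg h, List.filter_cons_of_neg h, ih]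

theorem pv_find?_filter_of_imp {α : Type} (p q : α → Bool)
    (himp : ∀ a, p a = true → q a = true) (l : List α) :
    (l.filter q).find? p = l.find? p := by
  induction l with
  | nil => rfl
  | cons x r ih =>
    by_cases hq : q x
    · by_cases hp : p x
      · simp [hq, List.find?, hp]
      · simp [hq, List.find?, hp, ih]
    · have hp : ¬ p x = true := fun h => hq (himp x h)
      simp [hq, List.find?, hp, ih]

theorem pv_insertBy_filter {α : Type} (key : α → Int) (h : Int) (x : α) (acc : List α)
    (hp : acc.Pairwise (fun a b => key a ≤ key b)) :
    (PySem.List.insertBy (fun a b => decide (key a < key b)) x acc).filter (fun a => key a == h)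
    = if key x == h then acc.filter (fun a => key a == h) ++ [x]
      else acc.filter (fun a => key a == h) := by
  induction acc with
  | nil =>
    rw [pv_insertBy_nil]
    by_cases hx : (key x == h) = true
    · rw [if_pos hx, List.filter_cons_of_pos (p := fun a => key a == h) hx, List.filter_nil,
        List.nil_append]
    · rw [if_neg hx, List.filter_cons_of_neg (p := fun a => key a == h) (by simpa using hx),
        List.filter_nil]
  | cons y ys ih =>
    have hy : ∀ b ∈ ys, key y ≤ key b := (List.pairwise_cons.mp hp).1
    have hp' := (List.pairwise_cons.mp hp).2
    rw [pv_insertBy_cons]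
    by_cases hlt : key x < key y
    · simp only [hlt, decide_true, if_true]
      by_cases hx : (key x == h) = true
      · have hxh : key x = h := by simpa using hx
        have hnil : (y :: ys).filter (fun a => key a == h) = [] := by
          rw [List.filter_eq_nil_iff]
          intro a ha
          rcases List.mem_cons.mp ha with rfl | ha'
          · simp only [beq_iff_eq]; omega
          · have := hy a ha'
            simp only [beq_iff_eq]; omega
        rw [List.filter_cons_of_pos (by simpa using hx), hnil]
        simp [hx]
      · rw [List.filter_cons_of_neg (by simpa using hx)]
        simp [hx]
    · simp only [hlt, decide_false, Bool.false_eq_true, if_false]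
      rw [List.filter_cons, List.filter_cons, ih hp']
      by_cases hyh : (key y == h) = true <;> by_cases hx : (key x == h) = true <;>
        simp [hyh, hx]

theorem pv_sorted_filter {α : Type} (key : α → Int) (h : Int) (xs : List α) :
    (PySem.List.sorted xs key).filter (fun a => key a == h)
    = xs.filter (fun a => key a == h) := by
  induction xs using List.reverseRecOn with
  | nil => rfl
  | append_singleton r x ih =>
    have hsort : PySem.List.sorted (r ++ [x]) key
        = PySem.List.insertBy (fun a b => decide (key a < key b)) x (PySem.List.sorted r key) := by
      rw [PySem.List.sorted_eq_foldl_insertBy, PySem.List.sorted_eq_foldl_insertBy,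
        List.foldl_append]
      rfl
    rw [hsort, pv_insertBy_filter key h x _ (PySem.List.sorted_pairwise r key),
      List.filter_append]
    by_cases hx : key x == h <;> simp [hx, ih]

theorem pvFd_sublist (l : List (Int × Int × Int)) : (pvFd l).Sublist l := by
  induction l using pvFd_ind with
  | h1 => simp [pvFd_nil]
  | h2 t r ih =>
    rw [pvFd_cons]
    exact (ih.trans List.filter_sublist).cons₂ t

theorem pvFd_keys_pairwise_ne (l : List (Int × Int × Int)) :
    (pvFd l).Pairwise (fun a b => a.1 ≠ b.1) := by
  induction l using pvFd_ind with
  | h1 => simp [pvFd_nil]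
  | h2 t r ih =>
    rw [pvFd_cons, List.pairwise_cons]
    refine ⟨fun b hb => ?_, ih⟩
    have hmem := (pvFd_sublist _).mem hb
    have := List.of_mem_filter hmem
    simp at this
    omega

theorem pvFd_mem_iff (l : List (Int × Int × Int)) (t : Int × Int × Int) :
    t ∈ pvFd l ↔ l.find? (fun u => u.1 == t.1) = some t := by
  induction l using pvFd_ind with
  | h1 => simp [pvFd_nil]
  | h2 x r ih =>
    rw [pvFd_cons]
    by_cases hx : x.1 = t.1
    · constructor
      · intro ht
        rcases List.mem_cons.mp ht with rfl | ht'
        · rw [List.find?_cons_of_pos (by simp)]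
        · exfalso
          have := List.of_mem_filter ((pvFd_sublist _).mem ht')
          simp at this
          omega
      · intro hf
        rw [List.find?_cons_of_pos (by simp [hx])] at hf
        exact List.mem_cons.mpr (Or.inl (Option.some.inj hf).symm)
    · have hrw := pv_find?_filter_of_imp (fun u => u.1 == t.1)
        (fun u => decide (u.1 ≠ x.1)) (by intro a ha; simp at ha ⊢; omega) r
      constructor
      · intro ht
        rcases List.mem_cons.mp ht with rfl | ht'
        · omega
        · have := ih.mp ht'
          rw [hrw] at this
          rw [List.find?_cons_of_neg (by simp [hx])]
          exact this
      · intro hf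
        rw [List.find?_cons_of_neg (by simp [hx])] at hf
        right
        exact ih.mpr (by rw [hrw]; exact hf)

theorem pvFd_nodup (l : List (Int × Int × Int)) : (pvFd l).Nodup :=
  (pvFd_keys_pairwise_ne l).imp (fun h heq => h (by rw [heq]))

theorem pvFd_sorted_comm (xs : List (Int × Int × Int)) :
    PySem.List.sorted (pvFd xs) (fun t => t.1)
    = pvFd (PySem.List.sorted xs (fun t => t.1)) := by
  apply PySem.List.sorted_eq_of_perm_of_pairwise_lt
  · rw [List.perm_ext_iff_of_nodup (pvFd_nodup _) (pvFd_nodup _)]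
    intro t
    rw [pvFd_mem_iff, pvFd_mem_iff,
      pv_find?_eq_head?_filter, pv_find?_eq_head?_filter,
      pv_sorted_filter (fun u => u.1) t.1 xs]
  · have hle : (pvFd (PySem.List.sorted xs (fun t => t.1))).Pairwise
        (fun a b => a.1 ≤ b.1) :=
      (PySem.List.sorted_pairwise xs (fun t => t.1)).sublist (pvFd_sublist _)
    have hne := pvFd_keys_pairwise_ne (PySem.List.sorted xs (fun t => t.1))
    exact (hle.and hne).imp (fun h => lt_of_le_of_ne h.1 h.2)

theorem pvFdS_eq (xs : List (Int × Int × Int)) : ∀ seen : List Int,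
    pvFdS seen xs = pvFd (xs.filter (fun t => decide (t.1 ∉ seen))) := by
  induction xs with
  | nil => intro seen; simp [pvFdS, pvFd_nil]
  | cons t r ih =>
    intro seen
    by_cases ht : t.1 ∈ seen
    · simp [pvFdS, ht, ih]
    · rw [pvFdS]
      simp only [ht, if_false]
      rw [List.filter_cons]
      simp only [ht, not_false_iff, decide_true, if_true]
      rw [pvFd_cons, ih (t.1 :: seen)]
      congr 1
      rw [List.filter_filter]
      congr 1
      apply List.filter_congr
      intro u _
      by_cases h1 : u.1 = t.1 <;> by_cases h2 : u.1 ∈ seen <;> simp [h1, h2]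

-- A's inner dedup step, on pre-built triples
def pvStepA (st : PySem.Set Int × List (Int × Int × Int)) (t : Int × Int × Int) :
    PySem.Set Int × List (Int × Int × Int) :=
  if t.1 ∈ st.1 then st else (st.1.add t.1, st.2 ++ [t])

theorem pv_foldl_stepA (xs : List (Int × Int × Int)) :
    ∀ (s : PySem.Set Int) (v : List (Int × Int × Int)) (seen : List Int),
    (∀ k : Int, k ∈ s ↔ k ∈ seen) →
    (xs.foldl pvStepA (s, v)).2 = v ++ pvFdS seen xs := by
  induction xs with
  | nil => intro s v seen _; simp [pvFdS]
  | cons t r ih =>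
    intro s v seen hmem
    rw [List.foldl_cons, pvStepA, pvFdS]
    by_cases ht : t.1 ∈ seen
    · have : t.1 ∈ s := (hmem t.1).mpr ht
      simp only [this, if_true, ht]
      exact ih s v seen hmem
    · have hts : t.1 ∉ s := fun h => ht ((hmem t.1).mp h)
      simp only [hts, if_false, ht]
      rw [ih (s.add t.1) (v ++ [t]) (t.1 :: seen)
        (by intro k; rw [PySem.Set.mem_add]; simp [hmem k, or_comm])]
      simp

-- B's run-dedup fold, reduced to the recursion pvRd
theorem pv_foldl_stepB (ss : List (Int × Int × Int)) :
    ∀ (acc : List (Int × Int)) (p : Option Int),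
    (ss.foldl (fun (st : List (Int × Int) × Option Int) t =>
        if st.2 ≠ some t.1 then (st.1 ++ [(t.2.1, t.2.2)], some t.1) else st) (acc, p)).1
    = acc ++ pvRd p ss := by
  induction ss with
  | nil => intro acc p; simp [pvRd]
  | cons t r ih =>
    intro acc p
    rw [List.foldl_cons, pvRd]
    by_cases hp : p ≠ some t.1
    · rw [if_pos hp, if_pos hp, ih]
      simp
    · rw [if_neg hp, if_neg hp]
      exact ih acc p

theorem pvRd_some (r : List (Int × Int × Int)) :
    ∀ h : Int, r.Pairwise (fun a b => a.1 ≤ b.1) → (∀ u ∈ r, h ≤ u.1) →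
    pvRd (some h) r
    = (pvFd (r.filter (fun u => decide (u.1 ≠ h)))).map (fun t => (t.2.1, t.2.2)) := by
  induction r with
  | nil => intro h _ _; simp [pvRd, pvFd_nil]
  | cons t r' ih =>
    intro h hp hall
    have ht' : ∀ u ∈ r', t.1 ≤ u.1 := (List.pairwise_cons.mp hp).1
    have hp' := (List.pairwise_cons.mp hp).2
    by_cases hth : t.1 = h
    · rw [pvRd, if_neg (by simp [hth]), List.filter_cons_of_neg (by simp [hth])]
      exact ih h hp' (fun u hu => hth ▸ ht' u hu)
    · have hlt : h < t.1 := lt_of_le_of_ne (hall t List.mem_cons_self) (fun e => hth e.symm)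
      rw [pvRd, if_pos (by simp; omega), List.filter_cons_of_pos (by simp [hth]),
        pvFd_cons]
      have hfr : r'.filter (fun u => decide (u.1 ≠ h)) = r' := by
        rw [List.filter_eq_self]
        intro u hu
        have := ht' u hu
        simp only [ne_eq, decide_eq_true_eq]
        omega
      rw [hfr, List.map_cons, ih t.1 hp' ht']

theorem pvRd_none (r : List (Int × Int × Int)) (hp : r.Pairwise (fun a b => a.1 ≤ b.1)) :
    pvRd none r = (pvFd r).map (fun t => (t.2.1, t.2.2)) := by
  cases r with
  | nil => simp [pvRd, pvFd_nil]
  | cons t r' =>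
    have ht' : ∀ u ∈ r', t.1 ≤ u.1 := (List.pairwise_cons.mp hp).1
    have hp' := (List.pairwise_cons.mp hp).2
    rw [pvRd, if_pos (by simp), pvFd_cons, List.map_cons, pvRd_some r' t.1 hp' ht']

-- A's double loop computes the pvStepA fold over pvL
theorem pv_A_loop_eq (limit_i limit_j : Int) :
    ((PySem.List.pyRange 0 limit_i 1).foldl (fun st i =>
      (PySem.List.pyRange 1 limit_j 1).foldl (fun (st : PySem.Set Int × List (Int × Int × Int)) j =>
        if min i j = 0 ∧ max i j = 0 then st
        else
          if i * i + j * j ∈ st.1 then st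
          else (st.1.add (i * i + j * j), st.2 ++ [(i * i + j * j, min i j, max i j)])) st)
      ((PySem.Set.ofList [], []) : PySem.Set Int × List (Int × Int × Int)))
    = (pvL limit_i limit_j).foldl pvStepA (PySem.Set.ofList [], []) := by
  rw [pvL, List.foldl_flatMap]
  apply PySem.List.foldl_congr_mem
  intro st i _
  rw [List.foldl_map]
  apply PySem.List.foldl_congr_mem
  intro acc j hj
  have hj1 : 1 ≤ j := (PySem.List.mem_pyRange_one.mp hj).1
  have hdy : ¬ (min i j = 0 ∧ max i j = 0) := by
    intro hc
    have : j ≤ max i j := le_max_right i j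
    omega
  simp only [pvStepA, hdy, if_false]

theorem build_vectors_eq (limit_i limit_j : Int) :
    build_vectors limit_i limit_j
    = (PySem.List.sorted (pvFd (pvL limit_i limit_j)) (fun t => t.1)).map
        (fun t => (t.2.1, t.2.2)) := by
  simp only [build_vectors]
  rw [pv_A_loop_eq]
  have h2 : ((pvL limit_i limit_j).foldl pvStepA (PySem.Set.ofList [], [])).2
      = [] ++ pvFdS [] (pvL limit_i limit_j) :=
    pv_foldl_stepA (pvL limit_i limit_j) (PySem.Set.ofList []) [] []
      (by intro k; simp)
  rw [h2, List.nil_append, pvFdS_eq, List.filter_eq_self.mpr (by intro u _; simp)]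

theorem build_vectors_alt_eq (limit_i limit_j : Int) :
    build_vectors_alt limit_i limit_j
    = (pvFd (PySem.List.sorted (pvL limit_i limit_j) (fun t => t.1))).map
        (fun t => (t.2.1, t.2.2)) := by
  simp only [build_vectors_alt]
  rw [pv_foldl_stepB, List.nil_append,
    pvRd_none _ (PySem.List.sorted_pairwise
      ((PySem.List.pyRange 0 limit_i 1).flatMap (fun i =>
        (PySem.List.pyRange 1 limit_j 1).map (fun j => (i * i + j * j, min i j, max i j))))
      (fun t => t.1))]
  rfl

-- ===== VERDICT (by name: the statement is the Claim_ definition above) =====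
theorem build_vectors_spec : Claim_equal_build_vectors := by
  intro limit_i limit_j _
  unfold Spec_build_vectors
  rw [build_vectors_eq, build_vectors_alt_eq, pvFd_sorted_comm]
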